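-- pv_equiv track=rewrite | github.com/minus-2008/train-time-calculation-sys | 2025/10/10-27-01.py | cell_exchange
-- ===== SOURCE A (Python) =====
-- def cell_exchange(x,y): #セルの変換
--   line='' #変換先を作成
--   alphabet_list=['Z','A','B','C','D','E','F','G','H','I','J','K','L','M','N','O','P','Q','R','S','T','U','V','W','X','Y']#変換リスト
--   while True: #列を指定
--     line_value=x%26 #余りを求める
--     x=(x-1)//26 #商
--     line_add=alphabet_list[line_value] #読み込み
--     line=line_add+line #書き込み
--     if x==0:
--       break #条件で終了
--   answer=line+str(y)
--   return answer
-- ===== SOURCE B (Python) =====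
-- def cell_exchange(x, y):
--     alphabet_list = ['Z','A','B','C','D','E','F','G','H','I','J','K','L','M',
--                      'N','O','P','Q','R','S','T','U','V','W','X','Y']
--     def conv(n):
--         letter = alphabet_list[n % 26]
--         nxt = (n - 1) // 26
--         return letter if nxt == 0 else conv(nxt) + letter
--     return conv(x) + str(y)
-- ===== Notes on version B (the rewrite author's own statement) =====
-- stated objective: alternative
-- what changed: Replaced A's while-loop with a string accumulator by a recursive helper conv that returns conv(next) + letter, keyed off next == 0 like A's break; same shifted alphabet, so every output matches.
import Mathlib
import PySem

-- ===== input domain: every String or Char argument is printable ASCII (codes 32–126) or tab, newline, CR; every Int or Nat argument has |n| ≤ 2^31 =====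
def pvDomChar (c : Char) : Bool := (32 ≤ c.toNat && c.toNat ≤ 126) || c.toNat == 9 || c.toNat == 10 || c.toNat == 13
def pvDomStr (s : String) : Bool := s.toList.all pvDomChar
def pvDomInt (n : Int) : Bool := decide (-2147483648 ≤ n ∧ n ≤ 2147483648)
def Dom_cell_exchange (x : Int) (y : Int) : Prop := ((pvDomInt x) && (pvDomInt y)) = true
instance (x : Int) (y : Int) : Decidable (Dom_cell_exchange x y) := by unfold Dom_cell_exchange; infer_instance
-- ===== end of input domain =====

-- B re-derives the same column letters recursively (conv next + letter, keyed off next == 0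
-- like A's break) instead of A's while-loop accumulator; objective: alternative decomposition.
-- Note: for x ≤ 0 both Python versions fail to terminate (loop forever / exceed the recursion
-- limit); the fueled ports are total, and equal on every input.

-- ===== PORT A =====
-- the shared shifted alphabet of the Python sources (index 0 -> 'Z')
def pvAlphabet : List String :=
  ["Z","A","B","C","D","E","F","G","H","I","J","K","L","M",
   "N","O","P","Q","R","S","T","U","V","W","X","Y"]

-- A's 'while True' loop, transliterated with fuel (the loop state is (x, line));
-- fuel x.toNat + 1 is sufficient for every x ≥ 1, where A terminates.
def cellLoopA : Nat → Int → String → String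
  | 0, _, line => line
  | fuel + 1, x, line =>
      let line_value := PySem.Int.mod x 26
      let x' := PySem.Int.floordiv (x - 1) 26
      -- alphabet_list[line_value]: line_value = x % 26 always lies in [0, 26), so in range
      let line_add := (PySem.List.pyGet? pvAlphabet line_value).getD ""
      let line' := line_add ++ line
      if x' == 0 then line' else cellLoopA fuel x' line'

def cell_exchange (x : Int) (y : Int) : String :=
  cellLoopA (x.toNat + 1) x "" ++ PySem.Int.toStr y

-- ===== PORT B =====
-- B's recursive conv, transliterated with the same fuel bound
def convB : Nat → Int → String
  | 0, _ => ""
  | fuel + 1, n =>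
      let letter := (PySem.List.pyGet? pvAlphabet (PySem.Int.mod n 26)).getD ""
      let nxt := PySem.Int.floordiv (n - 1) 26
      if nxt == 0 then letter else convB fuel nxt ++ letter

def cell_exchange_alt (x : Int) (y : Int) : String :=
  convB (x.toNat + 1) x ++ PySem.Int.toStr y

-- ===== PRECONDITION & SPEC =====
def Spec_cell_exchange (x : Int) (y : Int) (out : String) : Prop := out = cell_exchange_alt x y
instance (x : Int) (y : Int) (out : String) : Decidable (Spec_cell_exchange x y out) := by unfold Spec_cell_exchange; infer_instance

-- ===== CLAIM (what is proved, stated in full; the proofs are below) =====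
def Claim_equal_cell_exchange : Prop := ∀ (x : Int) (y : Int), Dom_cell_exchange x y → Spec_cell_exchange x y (cell_exchange x y)

-- ===== LEMMAS AND PROOFS =====

-- the loop with accumulator computes conv's string appended to the accumulator
theorem cellLoopA_eq_convB (fuel : Nat) : ∀ (x : Int) (line : String),
    cellLoopA fuel x line = convB fuel x ++ line := by
  induction fuel with
  | zero => intro x line; simp [cellLoopA, convB]
  | succ f ih =>
      intro x line
      simp only [cellLoopA, convB]
      split
      · rfl
      · rw [ih, String.append_assoc]

-- ===== VERDICT (by name: the statement is the Claim_ definition above) =====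
theorem cell_exchange_spec : Claim_equal_cell_exchange := by
  intro x y _
  unfold Spec_cell_exchange cell_exchange cell_exchange_alt
  rw [cellLoopA_eq_convB]
  simp
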